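-- pv_equiv track=rewrite | github.com/sujanmuppa/IIT-Dharwad-Research-Codes | sum_labelling2.py | isvalid_labelling
-- ===== SOURCE A (Python) =====
-- def is_edge(adj_list, vertex1, vertex2):
--     return vertex2 in adj_list[vertex1]
--
-- def isvalid_labelling(adj_list, graph_labels):
--     edge_sum = set()
--     non_edge_sum = set()
--
--     for i in range(len(adj_list)):
--         for j in range(i + 1, len(adj_list)):
--             sum_label = graph_labels[i] + graph_labels[j]
--             if is_edge(adj_list, i, j):
--                 edge_sum.add(sum_label)
--             else:
--                 non_edge_sum.add(sum_label)
--     for i in edge_sum: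
--         if i not in graph_labels:
--             return False
--     for i in non_edge_sum:
--         if i in graph_labels:
--             return False
--     return True
-- ===== SOURCE B (Python) =====
-- def isvalid_labelling(adj_list, graph_labels):
--     n = len(adj_list)
--     for i in range(n):
--         for j in range(i + 1, n):
--             sum_label = graph_labels[i] + graph_labels[j]
--             if (j in adj_list[i]) != (sum_label in graph_labels):
--                 return False
--     return True
-- ===== Notes on version B (the rewrite author's own statement) =====
-- stated objective: simpler
-- what changed: B drops A's two accumulated edge-sum/non-edge-sum sets and the two follow-up scan loops entirely: it checks each pair immediately in a single fused pass (edge-ness must equal label-membership of the sum) and returns False at the first violation.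
import Mathlib
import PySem

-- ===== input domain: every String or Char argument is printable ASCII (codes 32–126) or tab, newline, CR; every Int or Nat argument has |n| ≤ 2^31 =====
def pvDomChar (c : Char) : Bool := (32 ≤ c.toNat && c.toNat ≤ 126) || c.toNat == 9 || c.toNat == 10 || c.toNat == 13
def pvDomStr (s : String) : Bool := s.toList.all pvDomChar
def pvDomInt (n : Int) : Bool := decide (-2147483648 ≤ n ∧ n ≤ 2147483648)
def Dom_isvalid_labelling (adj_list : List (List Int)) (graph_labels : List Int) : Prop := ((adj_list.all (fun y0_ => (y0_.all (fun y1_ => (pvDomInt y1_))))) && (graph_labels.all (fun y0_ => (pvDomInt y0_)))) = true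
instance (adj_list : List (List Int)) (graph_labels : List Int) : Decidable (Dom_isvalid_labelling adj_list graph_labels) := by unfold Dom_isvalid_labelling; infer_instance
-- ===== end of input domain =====

-- B checks each vertex pair immediately in one fused pass (edge-ness must equal membership of the
-- label sum) instead of A's two accumulated sets plus two follow-up scan loops; objective: simpler.


-- ===== PORT A =====
def is_edge (adj_list : List (List Int)) (vertex1 vertex2 : Int) : Bool :=
  (PySem.List.pyGetD adj_list vertex1 []).contains vertex2

def isvalid_labelling (adj_list : List (List Int)) (graph_labels : List Int) : Bool :=
  -- build the two sets over the nested ranges, exactly as A's loops do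
  let st :=
    (PySem.List.pyRange 0 (adj_list.length : Int) 1).foldl
      (fun (st : PySem.Set Int × PySem.Set Int) i =>
        (PySem.List.pyRange (i + 1) (adj_list.length : Int) 1).foldl
          (fun st j =>
            let sum_label := PySem.List.pyGetD graph_labels i 0 + PySem.List.pyGetD graph_labels j 0
            if is_edge adj_list i j then (st.1.add sum_label, st.2)
            else (st.1, st.2.add sum_label))
          st)
      (PySem.Set.empty, PySem.Set.empty)
  -- the two early-return scan loops (order-independent: all-quantified membership tests)
  (st.1.all (fun s => graph_labels.contains s)) &&
  (st.2.all (fun s => !graph_labels.contains s))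

-- ===== PORT B =====
def isvalid_labelling_alt (adj_list : List (List Int)) (graph_labels : List Int) : Bool :=
  (PySem.List.pyRange 0 (adj_list.length : Int) 1).all fun i =>
    (PySem.List.pyRange (i + 1) (adj_list.length : Int) 1).all fun j =>
      let sum_label := PySem.List.pyGetD graph_labels i 0 + PySem.List.pyGetD graph_labels j 0
      (PySem.List.pyGetD adj_list i []).contains j == graph_labels.contains sum_label

-- ===== PRECONDITION & SPEC =====
-- Pre_ excludes exactly the inputs where both Pythons raise IndexError: graph_labels shorter than
-- adj_list while a pair of vertices exists (adj_list has ≥ 2 entries).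
def Pre_isvalid_labelling (adj_list : List (List Int)) (graph_labels : List Int) : Prop :=
  adj_list.length ≤ 1 ∨ adj_list.length ≤ graph_labels.length
instance (adj_list : List (List Int)) (graph_labels : List Int) : Decidable (Pre_isvalid_labelling adj_list graph_labels) := by unfold Pre_isvalid_labelling; infer_instance
def pvWitness_isvalid_labelling : List (List Int) × List Int := ([[1], [0]], [1, 2])

def Spec_isvalid_labelling (adj_list : List (List Int)) (graph_labels : List Int) (out : Bool) : Prop := out = isvalid_labelling_alt adj_list graph_labels
instance (adj_list : List (List Int)) (graph_labels : List Int) (out : Bool) : Decidable (Spec_isvalid_labelling adj_list graph_labels out) := by unfold Spec_isvalid_labelling; infer_instance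

-- ===== CLAIM (what is proved, stated in full; the proofs are below) =====
def Claim_equal_isvalid_labelling : Prop := ∀ (adj_list : List (List Int)) (graph_labels : List Int), Dom_isvalid_labelling adj_list graph_labels → Pre_isvalid_labelling adj_list graph_labels → Spec_isvalid_labelling adj_list graph_labels (isvalid_labelling adj_list graph_labels)

-- ===== LEMMAS AND PROOFS =====

-- final check A performs on its accumulated set pair
def pvCheck (labels : List Int) (st : PySem.Set Int × PySem.Set Int) : Bool :=
  (st.1.all (fun s => labels.contains s)) && (st.2.all (fun s => !labels.contains s))

-- adding an element to a set then testing `all p` is the same as conjoining `p x`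
lemma all_set_add {p : Int → Bool} (s : PySem.Set Int) (x : Int) :
    (s.add x).all p = (s.all p && p x) := by
  simp only [PySem.Set.add, PySem.Set.contains]
  split_ifs with hx
  · cases hall : s.all p
    · simp
    · have hpx : p x = true := List.all_eq_true.mp hall x (by simpa using hx)
      simp [hpx]
  · simp [List.all_append]

-- one pair processed by A's loop body, then checked, equals check-before && B's per-pair test
lemma check_step (adj_list : List (List Int)) (labels : List Int)
    (st : PySem.Set Int × PySem.Set Int) (i j : Int) :
    pvCheck labels
      (let s := PySem.List.pyGetD labels i 0 + PySem.List.pyGetD labels j 0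
       if is_edge adj_list i j then (st.1.add s, st.2) else (st.1, st.2.add s))
    = (pvCheck labels st &&
       ((PySem.List.pyGetD adj_list i []).contains j
         == labels.contains (PySem.List.pyGetD labels i 0 + PySem.List.pyGetD labels j 0))) := by
  simp only [pvCheck, is_edge]
  by_cases he : j ∈ PySem.List.pyGetD adj_list i [] <;>
    by_cases hm : (PySem.List.pyGetD labels i 0 + PySem.List.pyGetD labels j 0) ∈ labels <;>
      simp [he, hm, all_set_add, Bool.and_comm]

-- fold over the inner range, then check
lemma check_inner (adj_list : List (List Int)) (labels : List Int) (i : Int)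
    (L : List Int) (st : PySem.Set Int × PySem.Set Int) :
    pvCheck labels
      (L.foldl (fun st j =>
          let s := PySem.List.pyGetD labels i 0 + PySem.List.pyGetD labels j 0
          if is_edge adj_list i j then (st.1.add s, st.2) else (st.1, st.2.add s)) st)
    = (pvCheck labels st &&
       L.all (fun j => (PySem.List.pyGetD adj_list i []).contains j
         == labels.contains (PySem.List.pyGetD labels i 0 + PySem.List.pyGetD labels j 0))) := by
  induction L generalizing st with
  | nil => simp
  | cons j L ih =>
    simp only [List.foldl_cons, List.all_cons, ih, check_step, Bool.and_assoc]

-- fold over the outer range, then check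
lemma check_outer (adj_list : List (List Int)) (labels : List Int) (n : Int)
    (L : List Int) (st : PySem.Set Int × PySem.Set Int) :
    pvCheck labels
      (L.foldl (fun st i =>
          (PySem.List.pyRange (i + 1) n 1).foldl (fun st j =>
            let s := PySem.List.pyGetD labels i 0 + PySem.List.pyGetD labels j 0
            if is_edge adj_list i j then (st.1.add s, st.2) else (st.1, st.2.add s)) st) st)
    = (pvCheck labels st &&
       L.all (fun i => (PySem.List.pyRange (i + 1) n 1).all (fun j =>
         (PySem.List.pyGetD adj_list i []).contains j
           == labels.contains (PySem.List.pyGetD labels i 0 + PySem.List.pyGetD labels j 0)))) := by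
  induction L generalizing st with
  | nil => simp
  | cons i L ih =>
    simp only [List.foldl_cons, List.all_cons, ih, check_inner, Bool.and_assoc]

-- ===== VERDICT (by name: the statement is the Claim_ definition above) =====
theorem isvalid_labelling_spec : Claim_equal_isvalid_labelling := by
  intro adj_list graph_labels _ _
  unfold Spec_isvalid_labelling isvalid_labelling isvalid_labelling_alt
  have h := check_outer adj_list graph_labels (adj_list.length : Int)
    (PySem.List.pyRange 0 (adj_list.length : Int) 1) (PySem.Set.empty, PySem.Set.empty)
  simpa [pvCheck, PySem.Set.empty] using h
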